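-- pv_equiv track=rewrite | github.com/MrBrantCode/unitest_baseline | mut_generate/mist_train_taco/taco_16383/solution.py | pattern_in_text
-- ===== SOURCE A (Python) =====
-- def pattern_in_text(T: str, patterns: list[str]) -> list[int]:
--     base = 127
--     mask = (1 << 32) - 1
--
--     def calc_hash(f, pl, tl):
--         dl = tl - pl
--         tmp = set()
--         t = 1
--         for _ in range(pl):
--             t = t * base & mask
--         e = 0
--         for i in range(pl):
--             e = e * base + f[i] & mask
--         for i in range(dl):
--             tmp.add(e)
--             e = e * base - t * f[i] + f[i + pl] & mask
--         tmp.add(e)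
--         return tmp
--
--     t = tuple((ord(c) for c in T))
--     tl = len(t)
--     h = dict()
--     c = dict()
--     results = []
--
--     for p in patterns:
--         if p in c:
--             results.append(c[p])
--             continue
--         p = tuple((ord(c) for c in p))
--         pl = len(p)
--         if pl > tl:
--             results.append(0)
--             continue
--         bs = min(19, pl)
--         keys = calc_hash(p, bs, pl)
--         if bs not in h:
--             h[bs] = calc_hash(t, bs, tl)
--         results.append(1 if keys.issubset(h[bs]) else 0)
--
--     return results
-- ===== SOURCE B (Python) =====
-- def pattern_in_text(T: str, patterns: list[str]) -> list[int]:
--     base = 127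
--     mod = 1 << 32
--
--     def window_hashes(codes, bs):
--         out = set()
--         for i in range(len(codes) - bs + 1):
--             h = 0
--             for j in range(i, i + bs):
--                 h = (h * base + codes[j]) % mod
--             out.add(h)
--         return out
--
--     text = [ord(ch) for ch in T]
--     tl = len(text)
--     cache = {}
--     results = []
--     for p in patterns:
--         pl = len(p)
--         if pl > tl:
--             results.append(0)
--             continue
--         bs = min(19, pl)
--         if bs not in cache:
--             cache[bs] = window_hashes(text, bs)
--         results.append(1 if window_hashes([ord(ch) for ch in p], bs) <= cache[bs] else 0)
--     return results
-- ===== Notes on version B (the rewrite author's own statement) =====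
-- stated objective: alternative
-- what changed: Each window's polynomial hash mod 2^32 is recomputed directly from its bs characters instead of being maintained by A's rolling-hash update (with its base^bs precomputation), and A's never-written pattern-result cache is dropped.
import Mathlib
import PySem

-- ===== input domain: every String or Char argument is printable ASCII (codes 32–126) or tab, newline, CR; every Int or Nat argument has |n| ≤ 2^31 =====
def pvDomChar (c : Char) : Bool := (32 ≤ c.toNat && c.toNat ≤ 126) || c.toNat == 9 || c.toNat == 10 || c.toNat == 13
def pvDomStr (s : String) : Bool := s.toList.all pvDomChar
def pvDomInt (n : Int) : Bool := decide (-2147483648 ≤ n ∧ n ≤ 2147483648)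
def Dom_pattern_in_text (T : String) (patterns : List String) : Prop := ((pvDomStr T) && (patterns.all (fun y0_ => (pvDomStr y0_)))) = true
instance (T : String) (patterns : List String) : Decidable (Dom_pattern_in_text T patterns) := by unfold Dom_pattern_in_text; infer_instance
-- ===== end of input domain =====

-- B replaces A's rolling-hash window scan by an independent per-window recomputation of the
-- same polynomial hash mod 2^32 and drops A's never-written pattern cache (objective: simpler).

-- ===== PORT A =====
-- A's inner helper calc_hash: rolling hash over all pl-length windows of f (tl = len f at the call sites)
def pvCalcHash (f : List Int) (pl tl : Int) : PySem.Set Int :=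
  let dl := tl - pl
  let tmp : PySem.Set Int := PySem.Set.empty
  let t : Int := (PySem.List.pyRange 0 pl 1).foldl
    (fun t _ => PySem.Int.band (t * 127) 4294967295) 1
  let e : Int := (PySem.List.pyRange 0 pl 1).foldl
    (fun e i => PySem.Int.band (e * 127 + PySem.List.pyGetD f i 0) 4294967295) 0
  let st := (PySem.List.pyRange 0 dl 1).foldl
    (fun (st : PySem.Set Int × Int) i =>
      (PySem.Set.add st.1 st.2,
       PySem.Int.band (st.2 * 127 - t * PySem.List.pyGetD f i 0
         + PySem.List.pyGetD f (i + pl) 0) 4294967295))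
    (tmp, e)
  PySem.Set.add st.1 st.2

def pattern_in_text (T : String) (patterns : List String) : List Int :=
  let t : List Int := T.toList.map (fun ch => (ch.toNat : Int))
  let tl : Int := (t.length : Int)
  let st := patterns.foldl
    (fun (st : PySem.Dict Int (PySem.Set Int) × PySem.Dict String Int × List Int) p =>
      let (h, c, results) := st
      if c.contains p then (h, c, results ++ [c.getD p 0])
      else
        let pc : List Int := p.toList.map (fun ch => (ch.toNat : Int))
        let pl : Int := (pc.length : Int)
        if pl > tl then (h, c, results ++ [0])
        else
          let bs : Int := min 19 pl
          let keys := pvCalcHash pc bs pl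
          let h := if h.contains bs then h else h.insert bs (pvCalcHash t bs tl)
          (h, c, results ++ [if PySem.Set.issubset keys (h.getD bs PySem.Set.empty) then (1 : Int) else 0]))
    (PySem.Dict.empty, PySem.Dict.empty, [])
  st.2.2

-- ===== PORT B =====
-- B's helper: hash of every bs-length window of codes, each recomputed from scratch mod 2^32
def pvWindowHashes (codes : List Int) (bs : Int) : PySem.Set Int :=
  (PySem.List.pyRange 0 ((codes.length : Int) - bs + 1) 1).foldl
    (fun out i =>
      PySem.Set.add out
        ((PySem.List.pyRange i (i + bs) 1).foldl
          (fun h j => PySem.Int.mod (h * 127 + PySem.List.pyGetD codes j 0) 4294967296) 0))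
    PySem.Set.empty

def pattern_in_text_alt (T : String) (patterns : List String) : List Int :=
  let text : List Int := T.toList.map (fun ch => (ch.toNat : Int))
  let tl : Int := (text.length : Int)
  let st := patterns.foldl
    (fun (st : PySem.Dict Int (PySem.Set Int) × List Int) p =>
      let (cache, results) := st
      let pl : Int := PySem.Str.len p
      if pl > tl then (cache, results ++ [0])
      else
        let bs : Int := min 19 pl
        let cache := if cache.contains bs then cache else cache.insert bs (pvWindowHashes text bs)
        (cache, results ++ [if PySem.Set.issubset
            (pvWindowHashes (p.toList.map (fun ch => (ch.toNat : Int))) bs)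
            (cache.getD bs PySem.Set.empty) then (1 : Int) else 0]))
    (PySem.Dict.empty, [])
  st.2

-- ===== PRECONDITION & SPEC =====
def Spec_pattern_in_text (T : String) (patterns : List String) (out : List Int) : Prop := out = pattern_in_text_alt T patterns
instance (T : String) (patterns : List String) (out : List Int) : Decidable (Spec_pattern_in_text T patterns out) := by unfold Spec_pattern_in_text; infer_instance

-- ===== CLAIM (what is proved, stated in full; the proofs are below) =====
def Claim_equal_pattern_in_text : Prop := ∀ (T : String) (patterns : List String), Dom_pattern_in_text T patterns → Spec_pattern_in_text T patterns (pattern_in_text T patterns)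

-- ===== LEMMAS AND PROOFS =====

-- Python's '& (2^32-1)' is reduction mod 2^32
theorem pv_band_mask (a : Int) : PySem.Int.band a 4294967295 = a % 4294967296 := by
  simp only [PySem.Int.band, show Int.toNat 4294967295 = 4294967295 from rfl]
  have h1 := Nat.and_two_pow_sub_one_eq_mod a.toNat 32
  have h2 := Nat.and_two_pow_sub_one_eq_mod ((-a).toNat - 1) 32
  have h3 := Nat.and_two_pow_sub_one_eq_mod ((-a - 1)).toNat 32
  rw [Nat.land_comm] at h2
  rw [Nat.land_comm] at h3
  norm_num at h1 h2 h3 ⊢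
  split_ifs with h <;> omega

-- exact (un-reduced) polynomial hash of the window [i, i+bs)
def pvE (f : List Int) (i : Int) (bs : Nat) : Int :=
  (List.range bs).foldl (fun (h : Int) (j : Nat) => h * 127 + PySem.List.pyGetD f (i + (j : Int)) 0) 0

theorem pvE_succ (f : List Int) (i : Int) (bs : Nat) :
    pvE f i (bs + 1) = pvE f i bs * 127 + PySem.List.pyGetD f (i + (bs : Int)) 0 := by
  simp [pvE, List.range_succ]

theorem pv_mod_absorb (a c M : Int) :
    (a % M * 127 + c) % M = (a * 127 + c) % M := by
  have ha : Int.ModEq M (a % M) a := Int.emod_emod_of_dvd a dvd_rfl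
  exact (ha.mul_right 127).add_right c

theorem pv_mod_absorb_mul (a M : Int) : a % M * 127 % M = a * 127 % M := by
  have := pv_mod_absorb a 0 M; simpa using this

theorem pv_mod_absorb3 (a t b c M : Int) :
    (a % M * 127 - t % M * b + c) % M = (a * 127 - t * b + c) % M := by
  have ha : Int.ModEq M (a % M) a := Int.emod_emod_of_dvd a dvd_rfl
  have ht : Int.ModEq M (t % M) t := Int.emod_emod_of_dvd t dvd_rfl
  exact ((ha.mul_right 127).sub (ht.mul_right b)).add_right c

-- rolling-hash step identity on the exact hashes
theorem pv_roll (f : List Int) (bs : Nat) : ∀ (i : Int),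
    pvE f i bs * 127 - 127 ^ bs * PySem.List.pyGetD f i 0
      + PySem.List.pyGetD f (i + (bs : Int)) 0 = pvE f (i + 1) bs := by
  induction bs with
  | zero => intro i; simp [pvE]
  | succ n ih =>
    intro i
    have hidx : i + ((n + 1 : Nat) : Int) = (i + 1) + (n : Int) := by push_cast; ring
    rw [pvE_succ, pvE_succ, hidx, ← ih i]
    ring

-- folding with mod at each step computes the exact hash mod 2^32
theorem pv_modfold (f : List Int) (bs : Nat) (i : Int) :
    (List.range bs).foldl
        (fun (h : Int) (j : Nat) => (h * 127 + PySem.List.pyGetD f (i + (j : Int)) 0) % 4294967296) 0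
      = pvE f i bs % 4294967296 := by
  induction bs with
  | zero => simp [pvE]
  | succ n ih =>
    rw [List.range_succ, List.foldl_append, pvE_succ]
    simp only [List.foldl_cons, List.foldl_nil, ih]
    exact pv_mod_absorb _ _ _

-- a fold that ignores its elements and repeatedly multiplies by 127 mod 2^32
theorem pv_tfold (l : List Int) : ∀ (a : Int),
    l.foldl (fun t _ => t * 127 % 4294967296) (a % 4294967296)
      = a * 127 ^ l.length % 4294967296 := by
  induction l with
  | nil => intro a; simp
  | cons x xs ih =>
    intro a
    rw [List.foldl_cons, pv_mod_absorb_mul, ih (a * 127)]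
    rw [List.length_cons, pow_succ]
    ring_nf

-- canonical form of a window-hash set
def pvCanon (f : List Int) (n L : Nat) : PySem.Set Int :=
  ((List.range (L - n + 1)).map (fun k : Nat => pvE f (k : Int) n % 4294967296)).foldl PySem.Set.add []

theorem pvWindowHashes_canon (f : List Int) (n : Nat) (hn : n ≤ f.length) :
    pvWindowHashes f (n : Int) = pvCanon f n f.length := by
  have hmod : ∀ a : Int, PySem.Int.mod a 4294967296 = a % 4294967296 :=
    fun a => PySem.Int.mod_eq_emod_of_pos (by norm_num)
  have htn : ((f.length : Int) - (n : Int) + 1).toNat = f.length - n + 1 := by omega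
  have htn2 : ∀ k : Int, (k + (n : Int) - k).toNat = n := by intro k; omega
  simp only [pvWindowHashes, pvCanon, PySem.List.pyRange_one, hmod, htn, htn2,
    List.foldl_map, zero_add, sub_zero, pv_modfold]
  rfl

-- A's loop: starting at window i0 with the correct rolling value, it adds exactly the window hashes
theorem pv_loopA (f : List Int) (n : Nat) (dl : Nat) : ∀ (i0 : Int) (tmp : PySem.Set Int),
    PySem.Set.add
      ((((List.range dl).map (fun k : Nat => i0 + (k : Int)))).foldl
        (fun (st : PySem.Set Int × Int) idx =>
          (PySem.Set.add st.1 st.2,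
           (st.2 * 127 - 127 ^ n % 4294967296 * PySem.List.pyGetD f idx 0
             + PySem.List.pyGetD f (idx + (n : Int)) 0) % 4294967296))
        (tmp, pvE f i0 n % 4294967296)).1
      ((((List.range dl).map (fun k : Nat => i0 + (k : Int)))).foldl
        (fun (st : PySem.Set Int × Int) idx =>
          (PySem.Set.add st.1 st.2,
           (st.2 * 127 - 127 ^ n % 4294967296 * PySem.List.pyGetD f idx 0
             + PySem.List.pyGetD f (idx + (n : Int)) 0) % 4294967296))
        (tmp, pvE f i0 n % 4294967296)).2
    = ((List.range (dl + 1)).map (fun k : Nat => pvE f (i0 + (k : Int)) n % 4294967296)).foldl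
        PySem.Set.add tmp := by
  induction dl with
  | zero => intro i0 tmp; simp
  | succ m ih =>
    intro i0 tmp
    have hstep : (pvE f i0 n % 4294967296 * 127
        - 127 ^ n % 4294967296 * PySem.List.pyGetD f i0 0
        + PySem.List.pyGetD f (i0 + (n : Int)) 0) % 4294967296
        = pvE f (i0 + 1) n % 4294967296 := by
      rw [pv_mod_absorb3, pv_roll]
    have hshift : (fun k : Nat => i0 + ((k : Int) + 1)) = fun k : Nat => (i0 + 1) + (k : Int) := by
      funext k; ring
    have hshift2 : (fun k : Nat => pvE f (i0 + ((k : Int) + 1)) n % 4294967296)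
        = fun k : Nat => pvE f ((i0 + 1) + (k : Int)) n % 4294967296 := by
      funext k; rw [show i0 + ((k : Int) + 1) = (i0 + 1) + (k : Int) from by ring]
    conv_lhs => rw [List.range_succ_eq_map]
    simp only [List.map_cons, List.map_map, List.foldl_cons, Function.comp_def,
      Nat.succ_eq_add_one, Nat.cast_add, Nat.cast_one, Nat.cast_zero, add_zero, hstep, hshift]
    conv_rhs => rw [List.range_succ_eq_map]
    simp only [List.map_cons, List.map_map, List.foldl_cons, Function.comp_def,
      Nat.succ_eq_add_one, Nat.cast_add, Nat.cast_one, Nat.cast_zero, add_zero, hshift2]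
    exact ih (i0 + 1) (tmp.add (pvE f i0 n % 4294967296))

-- the t-loop of calc_hash computes 127^bs mod 2^32
theorem pv_tval (n : Nat) :
    (PySem.List.pyRange 0 (n : Int) 1).foldl (fun (t : Int) _ => t * 127 % 4294967296) (1 : Int)
      = 127 ^ n % 4294967296 := by
  have ht := pv_tfold (PySem.List.pyRange 0 (n : Int) 1) 1
  norm_num at ht
  exact ht

theorem pvCalcHash_canon (f : List Int) (n : Nat) (hn : n ≤ f.length) :
    pvCalcHash f (n : Int) (f.length : Int) = pvCanon f n f.length := by
  have he : (PySem.List.pyRange 0 (n : Int) 1).foldl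
      (fun (e : Int) (i : Int) => (e * 127 + PySem.List.pyGetD f i 0) % 4294967296) 0
      = pvE f 0 n % 4294967296 := by
    rw [PySem.List.pyRange_one, List.foldl_map, show ((n : Int) - 0).toNat = n from by omega]
    exact pv_modfold f n 0
  simp only [pvCalcHash, pv_band_mask]
  rw [pv_tval, he]
  rw [PySem.List.pyRange_one, show ((f.length : Int) - (n : Int) - 0).toNat = f.length - n from by omega]
  rw [pv_loopA f n (f.length - n) 0 PySem.Set.empty]
  have hz : (fun k : Nat => pvE f ((0 : Int) + (k : Int)) n % 4294967296)
      = fun k : Nat => pvE f (k : Int) n % 4294967296 := by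
    funext k; rw [zero_add]
  rw [hz]
  rfl

-- the two main loops agree step by step (A's pattern cache c stays empty forever)
theorem pv_hash_sets_eq (f : List Int) (n : Nat) (hn : n ≤ f.length) :
    pvCalcHash f (n : Int) (f.length : Int) = pvWindowHashes f (n : Int) := by
  rw [pvWindowHashes_canon f n hn, pvCalcHash_canon f n hn]

-- the two main loops agree step by step (A's pattern cache c stays empty forever)
theorem pv_main (tc : List Int) : ∀ (ps : List String) (h : PySem.Dict Int (PySem.Set Int)) (res : List Int),
    (ps.foldl
      (fun (st : PySem.Dict Int (PySem.Set Int) × PySem.Dict String Int × List Int) p =>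
        let (h, c, results) := st
        if c.contains p then (h, c, results ++ [c.getD p 0])
        else
          let pc : List Int := p.toList.map (fun ch => (ch.toNat : Int))
          let pl : Int := (pc.length : Int)
          if pl > (tc.length : Int) then (h, c, results ++ [0])
          else
            let bs : Int := min 19 pl
            let keys := pvCalcHash pc bs pl
            let h := if h.contains bs then h else h.insert bs (pvCalcHash tc bs (tc.length : Int))
            (h, c, results ++ [if PySem.Set.issubset keys (h.getD bs PySem.Set.empty) then (1 : Int) else 0]))
      (h, PySem.Dict.empty, res)).2.2
    = (ps.foldl
      (fun (st : PySem.Dict Int (PySem.Set Int) × List Int) p =>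
        let (cache, results) := st
        let pl : Int := PySem.Str.len p
        if pl > (tc.length : Int) then (cache, results ++ [0])
        else
          let bs : Int := min 19 pl
          let cache := if cache.contains bs then cache else cache.insert bs (pvWindowHashes tc bs)
          (cache, results ++ [if PySem.Set.issubset
              (pvWindowHashes (p.toList.map (fun ch => (ch.toNat : Int))) bs)
              (cache.getD bs PySem.Set.empty) then (1 : Int) else 0]))
      (h, res)).2 := by
  intro ps
  induction ps with
  | nil => intro h res; rfl
  | cons p ps ih =>
    intro h res
    rw [List.foldl_cons, List.foldl_cons]
    have hc : (PySem.Dict.empty : PySem.Dict String Int).contains p = false := by simp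
    have hl : PySem.Str.len p = ((p.toList.map (fun ch => (ch.toNat : Int))).length : Int) := by
      simp
    dsimp only
    simp only [hc, hl, Bool.false_eq_true, if_false]
    by_cases hgt : (((p.toList.map (fun ch => (ch.toNat : Int))).length : Int) > (tc.length : Int))
    · simp only [if_pos hgt]
      exact ih h (res ++ [0])
    · simp only [if_neg hgt]
      have hm1 : min 19 (p.toList.map (fun ch => (ch.toNat : Int))).length
          ≤ (p.toList.map (fun ch => (ch.toNat : Int))).length := min_le_right _ _
      have hm2 : min 19 (p.toList.map (fun ch => (ch.toNat : Int))).length ≤ tc.length := by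
        have : (p.toList.map (fun ch => (ch.toNat : Int))).length ≤ tc.length := by
          exact_mod_cast not_lt.mp hgt
        omega
      have hbs : min (19 : Int) (((p.toList.map (fun ch => (ch.toNat : Int))).length : Int))
          = ((min 19 (p.toList.map (fun ch => (ch.toNat : Int))).length : Nat) : Int) := by
        push_cast; rfl
      rw [hbs, pv_hash_sets_eq (p.toList.map (fun ch => (ch.toNat : Int))) _ hm1,
        pv_hash_sets_eq tc _ hm2]
      exact ih _ _

-- ===== VERDICT (by name: the statement is the Claim_ definition above) =====
set_option maxHeartbeats 1000000 in
theorem pattern_in_text_spec : Claim_equal_pattern_in_text := by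
  intro T patterns _
  show pattern_in_text T patterns = pattern_in_text_alt T patterns
  simp only [pattern_in_text, pattern_in_text_alt]
  exact pv_main (T.toList.map (fun ch => (ch.toNat : Int))) patterns PySem.Dict.empty []
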